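-- pv_equiv track=rewrite | github.com/ggiordann/prosperity | scripts/build_dp_oracle.py | order_price_for_quantity
-- ===== SOURCE A (Python) =====
-- def order_price_for_quantity(book_levels, quantity):
--     remaining = quantity
--     last_price = book_levels[-1][0]
--     for price, volume in book_levels:
--         take = min(remaining, volume)
--         remaining -= take
--         last_price = price
--         if remaining == 0:
--             return last_price
--     return last_price
-- ===== SOURCE B (Python) =====
-- def order_price_for_quantity(book_levels, quantity):
--     # Prefix-sum table, then return the price at the first level whose
--     # cumulative volume reaches the quantity; fall back to the deepest price.
--     cum = []
--     t = 0
--     for _, v in book_levels: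
--         t += v
--         cum.append(t)
--     for (price, _), c in zip(book_levels, cum):
--         if c >= quantity:
--             return price
--     return book_levels[-1][0]
-- ===== Notes on version B (the rewrite author's own statement) =====
-- stated objective: alternative
-- what changed: Replaces the running-remaining min/take early-exit scan with a materialised prefix-sum table that is then scanned for the first cumulative volume >= quantity, with the deepest price as fallback.
import Mathlib
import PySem

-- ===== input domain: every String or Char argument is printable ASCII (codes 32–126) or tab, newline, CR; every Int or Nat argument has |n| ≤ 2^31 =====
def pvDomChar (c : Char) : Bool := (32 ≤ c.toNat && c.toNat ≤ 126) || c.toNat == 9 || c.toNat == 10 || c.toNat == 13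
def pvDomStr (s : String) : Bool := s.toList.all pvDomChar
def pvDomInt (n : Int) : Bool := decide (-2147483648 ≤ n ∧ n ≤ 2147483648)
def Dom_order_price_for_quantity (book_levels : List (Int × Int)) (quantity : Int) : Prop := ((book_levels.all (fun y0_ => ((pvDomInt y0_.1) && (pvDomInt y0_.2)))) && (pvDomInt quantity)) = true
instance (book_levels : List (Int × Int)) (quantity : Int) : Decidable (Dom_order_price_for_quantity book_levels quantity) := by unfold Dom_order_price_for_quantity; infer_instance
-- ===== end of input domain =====

-- B replaces A's running-remaining min/take scan with a prefix-sum table scanned for the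
-- first cumulative volume >= quantity (alternative decomposition, same O(n) cost).


-- ===== PORT A =====
-- the for-loop of A: state = (remaining, last_price)
def opfqLoopA : List (Int × Int) → Int → Int → Int
  | [], _, last_price => last_price
  | (price, volume) :: rest, remaining, _ =>
      let take := min remaining volume
      let remaining' := remaining - take
      if remaining' = 0 then price else opfqLoopA rest remaining' price

def order_price_for_quantity (book_levels : List (Int × Int)) (quantity : Int) : Int :=
  -- book_levels[-1] raises IndexError on the empty book: excluded by Pre_
  match PySem.List.pyGet? book_levels (-1) with
  | none => 0
  | some lp => opfqLoopA book_levels quantity lp.1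

-- ===== PORT B =====
-- first loop of B: the prefix-sum table cum (t is the running total)
def opfqCum : List (Int × Int) → Int → List Int
  | [], _ => []
  | (_, v) :: rest, t => (t + v) :: opfqCum rest (t + v)

-- second loop of B: scan zip(book_levels, cum) for the first c >= quantity
def opfqScan (quantity : Int) : List ((Int × Int) × Int) → Option Int
  | [] => none
  | ((price, _), c) :: rest => if quantity ≤ c then some price else opfqScan quantity rest

def order_price_for_quantity_alt (book_levels : List (Int × Int)) (quantity : Int) : Int :=
  match opfqScan quantity (book_levels.zip (opfqCum book_levels 0)) with
  | some price => price
  | none =>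
    match PySem.List.pyGet? book_levels (-1) with
    | none => 0
    | some lp => lp.1

-- ===== PRECONDITION & SPEC =====
-- Pre_ excludes only the empty book, on which A raises IndexError (book_levels[-1]).
def Pre_order_price_for_quantity (book_levels : List (Int × Int)) (quantity : Int) : Prop :=
  book_levels ≠ []
instance (book_levels : List (Int × Int)) (quantity : Int) : Decidable (Pre_order_price_for_quantity book_levels quantity) := by unfold Pre_order_price_for_quantity; infer_instance

def pvWitness_order_price_for_quantity : (List (Int × Int)) × Int := ([(10, 5), (11, 7)], 8)

def Spec_order_price_for_quantity (book_levels : List (Int × Int)) (quantity : Int) (out : Int) : Prop := out = order_price_for_quantity_alt book_levels quantity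
instance (book_levels : List (Int × Int)) (quantity : Int) (out : Int) : Decidable (Spec_order_price_for_quantity book_levels quantity out) := by unfold Spec_order_price_for_quantity; infer_instance

-- ===== CLAIM (what is proved, stated in full; the proofs are below) =====
def Claim_equal_order_price_for_quantity : Prop := ∀ (book_levels : List (Int × Int)) (quantity : Int), Dom_order_price_for_quantity book_levels quantity → Pre_order_price_for_quantity book_levels quantity → Spec_order_price_for_quantity book_levels quantity (order_price_for_quantity book_levels quantity)

-- ===== LEMMAS AND PROOFS =====
-- A's loop stops at the first level i whose cumulative volume (from running total t)
-- reaches the quantity q; otherwise it falls through to the last level's price.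
theorem opfqLoopA_eq_scan (levels : List (Int × Int)) (q t last : Int) :
    opfqLoopA levels (q - t) last =
      match opfqScan q (levels.zip (opfqCum levels t)) with
      | some p => p
      | none => ((levels.getLast?).map Prod.fst).getD last := by
  induction levels generalizing t last with
  | nil => simp [opfqLoopA, opfqCum, opfqScan]
  | cons hd rest ih =>
    obtain ⟨p, v⟩ := hd
    simp only [opfqLoopA, opfqCum, opfqScan, List.zip_cons_cons]
    by_cases h : q ≤ t + v
    · have h1 : q - t - min (q - t) v = 0 := by omega
      simp [h, h1]
    · have h2 : q - t - min (q - t) v = q - (t + v) := by omega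
      rw [h2, if_neg (by omega : ¬ (q - (t + v) = 0)), if_neg h]
      rw [ih (t + v) p]
      cases hr : opfqScan q (rest.zip (opfqCum rest (t + v))) with
      | some p' => simp
      | none =>
        cases rest with
        | nil => simp
        | cons r rs =>
          rcases hgl : (r :: rs).getLast? with _ | y
          · exact absurd (List.getLast?_eq_none_iff.mp hgl) (by simp)
          · simp [hgl]

-- ===== VERDICT (by name: the statement is the Claim_ definition above) =====
theorem order_price_for_quantity_spec : Claim_equal_order_price_for_quantity := by
  intro bl q _ hne
  unfold Spec_order_price_for_quantity order_price_for_quantity order_price_for_quantity_alt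
  rw [PySem.List.pyGet?_neg_one]
  obtain ⟨lp, hlp⟩ : ∃ lp, bl.getLast? = some lp := by
    cases h : bl.getLast? with
    | none => exact absurd (List.getLast?_eq_none_iff.mp h) hne
    | some x => exact ⟨x, rfl⟩
  rw [hlp]
  have := opfqLoopA_eq_scan bl q 0 lp.1
  rw [show q - 0 = q by ring] at this
  show opfqLoopA bl q lp.1 = _
  rw [this, hlp]
  cases opfqScan q (bl.zip (opfqCum bl 0)) <;> simp
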